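-- pv_equiv track=rewrite | github.com/dcoffield97/rubiks_cube | scripts/rubiks_cube/rubiks_cube_key_exchange.py | Get_Byte_Array_From_Hex
-- ===== SOURCE A (Python) =====
-- def Get_Byte_Array_From_Hex(hex):
-- 	byte_array = []
-- 	hex_list = list(hex)
-- 	hex_list_index = 0
-- 	while hex_list_index+1 < len(hex_list):
-- 		byte = hex_list[hex_list_index] + hex_list[hex_list_index+1]
-- 		byte_array.append(byte)
-- 		hex_list_index = hex_list_index + 2
--
-- 	return byte_array
-- ===== SOURCE B (Python) =====
-- def Get_Byte_Array_From_Hex(hex):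
-- 	return [a + b for a, b in zip(hex[::2], hex[1::2])]
-- ===== Notes on version B (the rewrite author's own statement) =====
-- stated objective: idiomatic
-- what changed: Replaces the explicit while-loop with a running index by zipping the two strided slices hex[::2] and hex[1::2] and concatenating each pair; zip's truncation to the shorter slice drops a trailing odd character exactly as A's index+1 < len guard does.
import Mathlib
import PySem

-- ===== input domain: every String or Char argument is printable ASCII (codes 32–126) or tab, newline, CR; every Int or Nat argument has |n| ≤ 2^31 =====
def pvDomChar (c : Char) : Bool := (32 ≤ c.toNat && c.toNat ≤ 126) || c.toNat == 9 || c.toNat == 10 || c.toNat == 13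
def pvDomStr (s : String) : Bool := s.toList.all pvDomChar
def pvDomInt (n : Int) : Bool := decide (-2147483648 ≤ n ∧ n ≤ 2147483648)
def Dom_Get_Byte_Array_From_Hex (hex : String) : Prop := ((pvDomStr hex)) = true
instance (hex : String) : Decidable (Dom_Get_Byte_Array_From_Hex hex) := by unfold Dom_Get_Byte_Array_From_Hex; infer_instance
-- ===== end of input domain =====

-- B replaces A's index-driven while-loop by zipping the two strided slices hex[::2] and hex[1::2] (more idiomatic; same cost).


-- ===== PORT A =====
-- while hex_list_index+1 < len(hex_list): append hex_list[i] + hex_list[i+1]; i += 2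
-- (indices are always in range when read, so getD's default is never used)
def pvLoopA (l : List Char) (i : Nat) (acc : List String) : List String :=
  if i + 1 < l.length then
    pvLoopA l (i + 2) (acc ++ [String.singleton (l.getD i ' ') ++ String.singleton (l.getD (i+1) ' ')])
  else acc
termination_by l.length - i

def Get_Byte_Array_From_Hex (hex : String) : List String :=
  pvLoopA hex.toList 0 []

-- ===== PORT B =====
-- [a + b for a, b in zip(hex[::2], hex[1::2])]; step-2 slices via PySem.List.slice? (step ≠ 0 ⇒ some)
def Get_Byte_Array_From_Hex_alt (hex : String) : List String :=
  let evens := (PySem.List.slice? hex.toList none none 2).getD []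
  let odds  := (PySem.List.slice? hex.toList (some 1) none 2).getD []
  (evens.zip odds).map (fun p => String.singleton p.1 ++ String.singleton p.2)

-- ===== PRECONDITION & SPEC =====
def Spec_Get_Byte_Array_From_Hex (hex : String) (out : List String) : Prop := out = Get_Byte_Array_From_Hex_alt hex
instance (hex : String) (out : List String) : Decidable (Spec_Get_Byte_Array_From_Hex hex out) := by unfold Spec_Get_Byte_Array_From_Hex; infer_instance

-- ===== CLAIM (what is proved, stated in full; the proofs are below) =====
def Claim_equal_Get_Byte_Array_From_Hex : Prop := ∀ (hex : String), Dom_Get_Byte_Array_From_Hex hex → Spec_Get_Byte_Array_From_Hex hex (Get_Byte_Array_From_Hex hex)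

-- ===== LEMMAS AND PROOFS =====

/-- Elements at even positions. -/
def pvEvery2 {α : Type} : List α → List α
  | [] => []
  | [a] => [a]
  | a :: _ :: t => a :: pvEvery2 t

/-- The two-at-a-time pairing both programs compute. -/
def pvPairs : List Char → List String
  | a :: b :: t => (String.singleton a ++ String.singleton b) :: pvPairs t
  | _ => []

lemma pvFilterMap_even : ∀ {α : Type} (xs : List α),
    (List.range ((xs.length + 1) / 2)).filterMap (fun k => xs[2 * k]?) = pvEvery2 xs := by
  intro α xs
  induction xs using pvEvery2.induct with
  | case1 => simp [pvEvery2]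
  | case2 a => simp [pvEvery2]
  | case3 a b t ih =>
    have hlen : (((a :: b :: t).length + 1) / 2) = ((t.length + 1) / 2) + 1 := by
      simp; omega
    rw [hlen, List.range_succ_eq_map, List.filterMap_cons, List.filterMap_map]
    simp only [Function.comp]
    have hfun : (fun k => (a :: b :: t)[2 * (k + 1)]?) = (fun k : Nat => t[2 * k]?) := by
      funext k
      have h2 : 2 * (k + 1) = 2 * k + 1 + 1 := by omega
      rw [h2, List.getElem?_cons_succ, List.getElem?_cons_succ]
    simp only [Nat.succ_eq_add_one] at *
    rw [show (fun k => (a :: b :: t)[2 * (k + 1)]?) = (fun k : Nat => t[2 * k]?) from hfun, ih]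
    simp [pvEvery2]

lemma pvSlice2_evens {α : Type} (xs : List α) :
    PySem.List.slice? xs none none 2 = some (pvEvery2 xs) := by
  simp only [PySem.List.slice?, PySem.List.sliceIndices]
  norm_num
  have hcount : (if 0 < xs.length then (((xs.length : Int) + 2 - 1) / 2).toNat else 0)
      = (xs.length + 1) / 2 := by
    split_ifs with h
    · omega
    · omega
  rw [hcount]
  have h2k : ∀ k : Nat, ((2:Int) * (k:Int)).toNat = 2 * k := by
    intro k
    omega
  simp only [h2k]
  exact pvFilterMap_even xs

lemma pvSlice2_odds {α : Type} (xs : List α) :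
    PySem.List.slice? xs (some 1) none 2 = some (pvEvery2 xs.tail) := by
  simp only [PySem.List.slice?, PySem.List.sliceIndices]
  norm_num
  cases xs with
  | nil => simp [pvEvery2]
  | cons a t =>
    have hmin : min (1:Int) ((a :: t).length : Int) = 1 := by
      simp
    rw [hmin]
    have hcount : (if 1 < (a :: t).length then ((((a :: t).length : Int) - 1 + 2 - 1) / 2).toNat else 0)
        = (t.length + 1) / 2 := by
      simp only [List.length_cons]
      split_ifs with h
      · omega
      · omega
    rw [hcount]
    have hfun : (fun k : Nat => (a :: t)[((1:Int) + 2 * (k:Int)).toNat]?) = (fun k : Nat => t[2 * k]?) := by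
      funext k
      have : ((1:Int) + 2 * (k:Int)).toNat = 2 * k + 1 := by omega
      rw [this, List.getElem?_cons_succ]
    rw [hfun, pvFilterMap_even]
    rfl

lemma pvEvery2_cons {α : Type} (b : α) (t : List α) :
    pvEvery2 (b :: t) = b :: pvEvery2 t.tail := by
  cases t <;> rfl

lemma pvZip_pairs : ∀ (l : List Char),
    ((pvEvery2 l).zip (pvEvery2 l.tail)).map (fun p => String.singleton p.1 ++ String.singleton p.2)
      = pvPairs l := by
  intro l
  induction l using pvPairs.induct with
  | case1 a b t ih =>
    rw [show pvEvery2 (a :: b :: t) = a :: pvEvery2 t from rfl, List.tail_cons,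
        pvEvery2_cons b t, List.zip_cons_cons, List.map_cons, ih]
    rfl
  | case2 l h1 =>
    match l with
    | [] => simp [pvEvery2, pvPairs]
    | [a] => simp [pvEvery2, pvPairs]
    | a :: b :: t => exact absurd rfl (fun h => h1 a b t h)

lemma pvPairs_short (xs : List Char) (h : xs.length ≤ 1) : pvPairs xs = [] := by
  match xs, h with
  | [], _ => rfl
  | [a], _ => rfl

lemma pvLoopA_drop (l : List Char) (i : Nat) (acc : List String) :
    pvLoopA l i acc = acc ++ pvPairs (l.drop i) := by
  have key : ∀ (n i : Nat) (acc : List String), l.length - i ≤ n →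
      pvLoopA l i acc = acc ++ pvPairs (l.drop i) := by
    intro n
    induction n with
    | zero =>
      intro i acc hle
      rw [pvLoopA]
      have h : ¬ i + 1 < l.length := by omega
      rw [if_neg h, pvPairs_short (l.drop i) (by rw [List.length_drop]; omega), List.append_nil]
    | succ n ihn =>
      intro i acc hle
      rw [pvLoopA]
      by_cases h : i + 1 < l.length
      · rw [if_pos h, ihn (i + 2) _ (by omega)]
        have h1 : i < l.length := by omega
        have hd : l.drop i = l[i] :: l[i+1] :: l.drop (i + 2) := by
          rw [List.drop_eq_getElem_cons h1, List.drop_eq_getElem_cons h]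
        rw [hd, List.getD_eq_getElem l ' ' h1, List.getD_eq_getElem l ' ' h]
        simp [pvPairs]
      · rw [if_neg h, pvPairs_short (l.drop i) (by rw [List.length_drop]; omega), List.append_nil]
  exact key l.length i acc (by omega)

-- ===== VERDICT (by name: the statement is the Claim_ definition above) =====
theorem Get_Byte_Array_From_Hex_spec : Claim_equal_Get_Byte_Array_From_Hex := by
  intro hex _
  unfold Spec_Get_Byte_Array_From_Hex Get_Byte_Array_From_Hex Get_Byte_Array_From_Hex_alt
  rw [pvLoopA_drop, pvSlice2_evens, pvSlice2_odds]
  simpa using (pvZip_pairs hex.toList).symm
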